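-- pv_equiv track=rewrite | github.com/habinrahman/microdegree-outreach-platform | backend/app/services/reply_utils.py | clean_reply
-- ===== SOURCE A (Python) =====
-- _MAX_STORE = 100_000
--
-- def clean_reply(text: str) -> str:
--     if not text:
--         return ""
--
--     text = text.replace("\uFEFF", "")
--
--     separators = [
--         "-----Original Message-----",
--         "From:",
--         "On Mon",
--         "On Tue",
--         "On Wed",
--         "On Thu",
--         "On Fri",
--         "On Sat",
--         "On Sun",
--     ]
--
--     for sep in separators:
--         if sep in text:
--             text = text.split(sep, maxsplit=1)[0]
--
--     out = text.strip()
--     return out[:_MAX_STORE] if out else ""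
-- ===== SOURCE B (Python) =====
-- _MAX_STORE = 100_000
--
-- _SEPARATORS = (
--     "-----Original Message-----",
--     "From:",
--     "On Mon",
--     "On Tue",
--     "On Wed",
--     "On Thu",
--     "On Fri",
--     "On Sat",
--     "On Sun",
-- )
--
-- def clean_reply(text: str) -> str:
--     # Single cut: the earliest position where any separator occurs, one slice.
--     if not text:
--         return ""
--     text = text.replace("\uFEFF", "")
--     positions = [p for p in (text.find(sep) for sep in _SEPARATORS) if p != -1]
--     cut = min(positions) if positions else len(text)
--     out = text[:cut].strip()
--     return out[:_MAX_STORE] if out else ""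
-- ===== Notes on version B (the rewrite author's own statement) =====
-- stated objective: simpler
-- what changed: A rebinds the text nine times, splitting at each separator in turn and keeping the first piece; B computes each separator's first-occurrence position on the unmodified text, takes the minimum found position as a single cut point, and slices once.
import Mathlib
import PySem

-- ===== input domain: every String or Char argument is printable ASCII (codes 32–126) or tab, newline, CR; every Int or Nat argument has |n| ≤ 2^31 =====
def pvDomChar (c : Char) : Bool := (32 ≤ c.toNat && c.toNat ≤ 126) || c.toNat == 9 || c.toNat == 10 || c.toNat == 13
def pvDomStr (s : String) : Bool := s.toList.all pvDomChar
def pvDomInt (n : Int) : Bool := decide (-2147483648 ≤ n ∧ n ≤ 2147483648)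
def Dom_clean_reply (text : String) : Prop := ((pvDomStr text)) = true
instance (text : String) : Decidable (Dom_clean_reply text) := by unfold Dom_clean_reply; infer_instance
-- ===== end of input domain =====

-- B replaces A's nine dependent split-and-reassign steps by one earliest-cut computation and a single slice (objective: simpler).

def pvSeps : List (List Char) :=
  ["-----Original Message-----".toList, "From:".toList, "On Mon".toList, "On Tue".toList,
   "On Wed".toList, "On Thu".toList, "On Fri".toList, "On Sat".toList, "On Sun".toList]

-- ===== PORT A =====
-- for sep in separators: if sep in text: text = text.split(sep, maxsplit=1)[0]
def clean_reply (text : String) : String :=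
  if text = "" then ""
  else
    let cs := (PySem.Str.replace text "\uFEFF" "").toList
    let cs := pvSeps.foldl (fun t sep =>
      if PySem.Chars.isIn sep t then (PySem.Chars.splitOnMax t sep 1).headD t else t) cs
    let out := PySem.Chars.strip cs
    if out = [] then "" else String.ofList (PySem.Chars.slice out none (some 100000))

-- ===== PORT B =====
-- positions = [p for p in (text.find(sep) for sep in seps) if p != -1]; cut = min(positions) if positions else len(text)
def clean_reply_alt (text : String) : String :=
  if text = "" then ""
  else
    let cs := (PySem.Str.replace text "\uFEFF" "").toList
    let positions := (pvSeps.map (fun sep => PySem.Chars.find cs sep)).filter (fun p => p ≠ -1)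
    let cut : Int := if positions = [] then ((PySem.Chars.len cs : Int)) else (PySem.List.min? positions (fun p => p)).getD 0
    let out := PySem.Chars.strip (PySem.Chars.slice cs none (some cut))
    if out = [] then "" else String.ofList (PySem.Chars.slice out none (some 100000))

-- ===== PRECONDITION & SPEC =====
def Spec_clean_reply (text : String) (out : String) : Prop := out = clean_reply_alt text
instance (text : String) (out : String) : Decidable (Spec_clean_reply text out) := by unfold Spec_clean_reply; infer_instance

-- ===== CLAIM (what is proved, stated in full; the proofs are below) =====
def Claim_equal_clean_reply : Prop := ∀ (text : String), Dom_clean_reply text → Spec_clean_reply text (clean_reply text)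

-- ===== LEMMAS AND PROOFS =====

-- "s cannot start at offset d inside an occurrence of s'": some character of the overlap region disagrees
def pvIncompatB (s s' : List Char) : Bool :=
  (List.range s.length).all fun d => d == 0 ||
    (List.range (min s'.length (s.length - d))).any fun i => s[d+i]? != s'[i]?

lemma pv_go_zero (sep : List Char) (fuel : Nat) (l : List Char) (acc : List (List Char)) :
    PySem.Chars.splitOnMax.go sep fuel 0 l [] acc = (l :: acc).reverse := by
  cases fuel with
  | zero => rw [PySem.Chars.splitOnMax.go]; simp
  | succ n =>
    cases l with
    | nil => rw [PySem.Chars.splitOnMax.go] <;> simp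
    | cons c rest => rw [PySem.Chars.splitOnMax.go] <;> simp

lemma pv_go_head (sep : List Char) (hsep : sep ≠ []) :
    ∀ (fuel : Nat) (l cur : List Char) (q : Nat), l.length < fuel →
      sep <+: l.drop q → (∀ i, i < q → ¬ sep <+: l.drop i) →
      PySem.Chars.splitOnMax.go sep fuel 1 l cur [] =
        [cur.reverse ++ l.take q, l.drop (q + sep.length)] := by
  intro fuel
  induction fuel with
  | zero => intro l cur q hl; omega
  | succ n ih =>
    intro l cur q hl hq hmin
    cases l with
    | nil =>
      exfalso
      simp at hq
      exact hsep hq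
    | cons c rest =>
      by_cases h0 : q = 0
      · subst h0
        have hpre : sep.isPrefixOf (c :: rest) = true := by
          rw [List.isPrefixOf_iff_prefix]; simpa using hq
        rw [PySem.Chars.splitOnMax.go]
        simp only [hpre, if_true, if_neg (by omega : ¬ (1:Nat) = 0)]
        rw [pv_go_zero]
        simp
      · obtain ⟨q', rfl⟩ : ∃ q', q = q' + 1 := ⟨q - 1, by omega⟩
        have hnpre : sep.isPrefixOf (c :: rest) = false := by
          rw [Bool.eq_false_iff, ne_eq, List.isPrefixOf_iff_prefix]
          intro hp
          exact hmin 0 (by omega) (by simpa using hp)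
        have hq' : sep <+: rest.drop q' := by simpa [List.drop_succ_cons] using hq
        have hmin' : ∀ i, i < q' → ¬ sep <+: rest.drop i := by
          intro i hi
          have := hmin (i + 1) (by omega)
          simpa [List.drop_succ_cons] using this
        rw [PySem.Chars.splitOnMax.go]
        simp only [hnpre, if_neg (by omega : ¬ (1:Nat) = 0), Bool.false_eq_true, if_false]
        rw [ih rest (c :: cur) q' (by simpa using Nat.lt_of_succ_lt_succ hl) hq' hmin']
        have harith : q' + 1 + sep.length = (q' + sep.length) + 1 := by omega
        rw [harith]
        simp [List.take_succ_cons, List.drop_succ_cons]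

-- head of text.split(sep, 1) when sep occurs in t
lemma pv_stepA_eq (t sep : List Char) (hsep : sep ≠ []) (h : PySem.Chars.isIn sep t = true) :
    (PySem.Chars.splitOnMax t sep 1).headD t = t.take (PySem.Chars.find t sep).toNat := by
  have hinf : sep <:+: t := (PySem.Chars.isIn_iff_infix sep t).mp h
  have hnn : 0 ≤ PySem.Chars.find t sep := (PySem.Chars.find_nonneg_iff t sep).mpr hinf
  obtain ⟨hocc, hmin⟩ := PySem.Chars.find_spec hnn
  rw [PySem.Chars.splitOnMax]
  rw [if_neg (by omega : ¬ (1:Int) < 0), show (1:Int).toNat = 1 from rfl]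
  rw [pv_go_head sep hsep (t.length + 1) t [] _ (by omega) (by simpa using hocc)
    (by intro i hi; exact hmin i hi)]
  simp

lemma pv_prefix_getElem? (s l : List Char) (h : s <+: l) (i : Nat) (hi : i < s.length) :
    l[i]? = s[i]? := by
  obtain ⟨t, rfl⟩ := h
  exact List.getElem?_append_left hi

-- an occurrence of s cannot straddle the start of an occurrence of an incompatible s'
lemma pv_straddle (cs s s' : List Char) (q c : Nat)
    (hs : s <+: cs.drop q) (hs' : s' <+: cs.drop c)
    (h1 : q < c) (h2 : c < q + s.length) (hinc : pvIncompatB s s' = true) : False := by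
  simp only [pvIncompatB, List.all_eq_true, List.any_eq_true, List.mem_range, beq_iff_eq,
    bne_iff_ne, Bool.or_eq_true] at hinc
  obtain hd | ⟨i, hi, hne⟩ := hinc (c - q) (by omega)
  · omega
  · have hi1 : i < s'.length := by omega
    have hi2 : c - q + i < s.length := by omega
    apply hne
    have e1 : s[c - q + i]? = cs[q + (c - q + i)]? := by
      rw [← pv_prefix_getElem? s _ hs _ hi2, List.getElem?_drop]
    have e2 : s'[i]? = cs[c + i]? := by
      rw [← pv_prefix_getElem? s' _ hs' _ hi1, List.getElem?_drop]
    rw [e1, e2]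
    congr 1
    omega

-- A's sequential truncation loop computes the take at the running earliest-cut fold
lemma pv_aux (cs : List Char) :
    ∀ (S P : List (List Char)),
      (∀ s ∈ S, s ≠ []) →
      (∀ s ∈ S, ∀ s' ∈ P, pvIncompatB s s' = true) →
      List.Pairwise (fun a b => pvIncompatB b a = true) S →
      ∀ c : Nat, c ≤ cs.length →
      (c = cs.length ∨ ∃ s' ∈ P, s' <+: cs.drop c) →
      S.foldl (fun t sep =>
          if PySem.Chars.isIn sep t then (PySem.Chars.splitOnMax t sep 1).headD t else t) (cs.take c)
        = cs.take (S.foldl (fun c' s =>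
            if PySem.Chars.find cs s = -1 then c' else min c' (PySem.Chars.find cs s).toNat) c) := by
  intro S
  induction S with
  | nil => intro P _ _ _ c _ _; simp
  | cons s rest ih =>
    intro P hss hinc hord c hc hreal
    have hs0 : s ≠ [] := hss s (by simp)
    have hlen0 : 0 < s.length := List.length_pos_of_ne_nil hs0
    simp only [List.foldl_cons]
    by_cases hfind : PySem.Chars.find cs s = -1
    · have hnocs : ¬ s <:+: cs := (PySem.Chars.find_eq_neg_one_iff cs s).mp hfind
      have hnot : PySem.Chars.isIn s (cs.take c) = false := by
        cases hIn : PySem.Chars.isIn s (cs.take c) with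
        | false => rfl
        | true =>
          exfalso
          obtain ⟨j, hj⟩ := (PySem.Chars.exists_prefix_drop_iff_isIn s (cs.take c)).mpr hIn
          rw [List.drop_take] at hj
          exact hnocs ((PySem.Chars.isIn_iff_infix s cs).mp
            ((PySem.Chars.exists_prefix_drop_iff_isIn s cs).mp ⟨j, (List.prefix_take_iff.mp hj).1⟩))
      rw [hnot, if_pos hfind]
      simp only [Bool.false_eq_true, if_false]
      exact ih P (fun a ha => hss a (by simp [ha]))
        (fun a ha s' hs' => hinc a (by simp [ha]) s' hs') (List.Pairwise.of_cons hord) c hc hreal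
    · have hnn : 0 ≤ PySem.Chars.find cs s := by
        have := PySem.Chars.neg_one_le_find cs s
        omega
      obtain ⟨hocc, hmin⟩ := PySem.Chars.find_spec hnn
      set q := (PySem.Chars.find cs s).toNat with hqdef
      have hqlen : q + s.length ≤ cs.length := by
        have h1 := hocc.length_le
        have h2 := List.length_drop (l := cs) (i := q)
        omega
      rw [if_neg hfind]
      by_cases hfit : q + s.length ≤ c
      · -- the first cs-occurrence of s lies inside the current prefix: cut moves to q
        have hocc_t : s <+: (cs.take c).drop q := by
          rw [List.drop_take]
          exact List.prefix_take_iff.mpr ⟨hocc, by omega⟩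
        have hIn : PySem.Chars.isIn s (cs.take c) = true :=
          (PySem.Chars.exists_prefix_drop_iff_isIn s (cs.take c)).mp ⟨q, hocc_t⟩
        have hnn_t : 0 ≤ PySem.Chars.find (cs.take c) s :=
          (PySem.Chars.find_nonneg_iff (cs.take c) s).mpr ((PySem.Chars.isIn_iff_infix s (cs.take c)).mp hIn)
        obtain ⟨hocc_t', hmin_t⟩ := PySem.Chars.find_spec hnn_t
        have hfq : (PySem.Chars.find (cs.take c) s).toNat = q := by
          rcases Nat.lt_trichotomy (PySem.Chars.find (cs.take c) s).toNat q with hlt | heq | hgt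
          · exfalso
            rw [List.drop_take] at hocc_t'
            exact hmin _ hlt (List.prefix_take_iff.mp hocc_t').1
          · exact heq
          · exact absurd hocc_t (hmin_t q hgt)
        rw [hIn, if_pos rfl, pv_stepA_eq _ s hs0 hIn, hfq, List.take_take,
          Nat.min_eq_left (by omega : q ≤ c), Nat.min_eq_right (by omega : q ≤ c)]
        exact ih (s :: P) (fun a ha => hss a (by simp [ha]))
          (fun a ha s' hs' => by
            rcases List.mem_cons.mp hs' with rfl | hs'P
            · exact (List.pairwise_cons.mp hord).1 a ha
            · exact hinc a (by simp [ha]) s' hs'P)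
          (List.Pairwise.of_cons hord) q (by omega)
          (Or.inr ⟨s, List.mem_cons_self, hocc⟩)
      · -- the occurrence starts at or beyond the cut (a straddle is impossible): nothing changes
        have hle : c ≤ q := by
          by_contra hlt
          push_neg at hlt
          rcases hreal with rfl | ⟨s', hs'P, hs'occ⟩
          · omega
          · exact pv_straddle cs s s' q c hocc hs'occ hlt (by omega)
              (hinc s (by simp) s' hs'P)
        have hnot : PySem.Chars.isIn s (cs.take c) = false := by
          cases hIn : PySem.Chars.isIn s (cs.take c) with
          | false => rfl
          | true =>
            exfalso
            obtain ⟨j, hj⟩ := (PySem.Chars.exists_prefix_drop_iff_isIn s (cs.take c)).mpr hIn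
            rw [List.drop_take] at hj
            obtain ⟨hj1, hj2⟩ := List.prefix_take_iff.mp hj
            have hjq : q ≤ j := by
              by_contra hjq
              exact hmin j (by omega) hj1
            omega
        rw [hnot]
        simp only [Bool.false_eq_true, if_false]
        rw [Nat.min_eq_left hle]
        exact ih P (fun a ha => hss a (by simp [ha]))
          (fun a ha s' hs' => hinc a (by simp [ha]) s' hs') (List.Pairwise.of_cons hord) c hc hreal

lemma pv_foldg_eq_filter (cs : List Char) :
    ∀ (S : List (List Char)) (c : Nat),
      S.foldl (fun c' s =>
          if PySem.Chars.find cs s = -1 then c' else min c' (PySem.Chars.find cs s).toNat) c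
        = ((S.map (fun sep => PySem.Chars.find cs sep)).filter (fun p => p ≠ -1)).foldl
            (fun a p => min a p.toNat) c := by
  intro S
  induction S with
  | nil => intro c; rfl
  | cons s rest ih =>
    intro c
    by_cases h : PySem.Chars.find cs s = -1 <;>
      simp [List.filter_cons, h, ih]

lemma pv_foldmin_spec :
    ∀ (P : List Int) (c : Nat),
      (P.foldl (fun a p => min a p.toNat) c = c ∨
        ∃ p ∈ P, P.foldl (fun a p => min a p.toNat) c = p.toNat) ∧
      P.foldl (fun a p => min a p.toNat) c ≤ c ∧
      (∀ p ∈ P, P.foldl (fun a p => min a p.toNat) c ≤ p.toNat) := by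
  intro P
  induction P with
  | nil => intro c; simp
  | cons x rest ih =>
    intro c
    obtain ⟨hcase, hle, hall⟩ := ih (min c x.toNat)
    refine ⟨?_, ?_, ?_⟩
    · simp only [List.foldl_cons]
      rcases hcase with h | ⟨p, hp, h⟩
      · rcases Nat.le_total c x.toNat with hcx | hcx
        · left; rw [h, Nat.min_eq_left hcx]
        · right; exact ⟨x, by simp, by rw [h, Nat.min_eq_right hcx]⟩
      · right; exact ⟨p, by simp [hp], h⟩
    · simp only [List.foldl_cons]; omega
    · intro p hp
      simp only [List.foldl_cons]
      rcases List.mem_cons.mp hp with rfl | hp'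
      · omega
      · exact hall p hp'

-- the two cut computations agree
lemma pv_cut_eq (cs : List Char) :
    cs.take (pvSeps.foldl (fun c' s =>
        if PySem.Chars.find cs s = -1 then c' else min c' (PySem.Chars.find cs s).toNat) cs.length)
      = PySem.Chars.slice cs none (some
          (if ((pvSeps.map (fun sep => PySem.Chars.find cs sep)).filter (fun p => p ≠ -1)) = []
           then ((PySem.Chars.len cs : Int))
           else (PySem.List.min? ((pvSeps.map (fun sep => PySem.Chars.find cs sep)).filter (fun p => p ≠ -1)) (fun p => p)).getD 0)) := by
  have hseps_ne : ∀ s ∈ pvSeps, s ≠ [] := by decide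
  set positions := ((pvSeps.map (fun sep => PySem.Chars.find cs sep)).filter (fun p => p ≠ -1)) with hpos
  have hmem : ∀ p ∈ positions, 0 ≤ p ∧ p.toNat + 1 ≤ cs.length := by
    intro p hp
    rw [hpos] at hp
    obtain ⟨hp1, hp2⟩ := List.mem_filter.mp hp
    obtain ⟨s, hsmem, rfl⟩ := List.mem_map.mp hp1
    have hne : PySem.Chars.find cs s ≠ -1 := by simpa using hp2
    have hge := PySem.Chars.neg_one_le_find cs s
    have hnn : 0 ≤ PySem.Chars.find cs s := by omega
    obtain ⟨hocc, -⟩ := PySem.Chars.find_spec hnn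
    have hlen := hocc.length_le
    have hld := List.length_drop (l := cs) (i := (PySem.Chars.find cs s).toNat)
    have hs0 : 0 < s.length := List.length_pos_of_ne_nil (hseps_ne s hsmem)
    exact ⟨hnn, by omega⟩
  rw [pv_foldg_eq_filter cs pvSeps cs.length, ← hpos]
  by_cases hemp : positions = []
  · rw [if_pos hemp, hemp]
    simp only [List.foldl_nil, PySem.Chars.slice_eq_listSlice, PySem.Chars.len_eq]
    rw [PySem.List.slice_to_natCast]
  · obtain ⟨m, hm⟩ : ∃ m, PySem.List.min? positions (fun p => p) = some m := by
      cases h : PySem.List.min? positions (fun p => p) with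
      | none => exact absurd ((PySem.List.min?_eq_none_iff positions (fun p => p)).mp h) hemp
      | some m => exact ⟨m, rfl⟩
    have hmmem := PySem.List.min?_mem hm
    have hminall := PySem.List.min?_isMin hm
    obtain ⟨hm0, hmlt⟩ := hmem m hmmem
    rw [if_neg hemp, hm]
    simp only [Option.getD_some, PySem.Chars.slice_eq_listSlice]
    rw [PySem.List.slice_to cs hm0]
    congr 1
    obtain ⟨hcase, hle, hall⟩ := pv_foldmin_spec positions cs.length
    have h1 := hall m hmmem
    rcases hcase with h | ⟨p, hp, h⟩
    · omega
    · have h2 := hminall p hp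
      have h3 := (hmem p hp).1
      omega

-- ===== VERDICT (by name: the statement is the Claim_ definition above) =====
theorem clean_reply_spec : Claim_equal_clean_reply := by
  intro text _
  unfold Spec_clean_reply clean_reply clean_reply_alt
  by_cases h : text = ""
  · simp [h]
  · simp only [h, if_false]
    set cs := (PySem.Str.replace text "\uFEFF" "").toList with hcs
    have hloop :
        pvSeps.foldl (fun t sep =>
            if PySem.Chars.isIn sep t then (PySem.Chars.splitOnMax t sep 1).headD t else t) cs
          = cs.take (pvSeps.foldl (fun c' s =>
              if PySem.Chars.find cs s = -1 then c' else min c' (PySem.Chars.find cs s).toNat) cs.length) := by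
      have := pv_aux cs pvSeps []
        (by decide) (by simp) (by decide) cs.length le_rfl (Or.inl rfl)
      simpa using this
    rw [hloop, pv_cut_eq]
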